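-- pv_equiv track=rewrite | github.com/karoosoftware/margana-backend | layer-root/python/margana_gen/column_logic.py | compute_lambda_style_total
-- ===== SOURCE A (Python) =====
-- from typing import List, Optional, Tuple, Dict
--
-- def compute_lambda_style_total(
--     rows: List[str],
--     col: int,
--     target: str,
--     diag: str,
--     diag_dir: str,
--     words5: List[str],
--     combined_diag_words: List[str],
--     longest_one: str,
--     letter_scores: Dict[str, int]
-- ) -> int:
--     """
--     Score a generated puzzle using the same logic as the Lambda.
--     """
--     def score_word(w: str) -> int:
--         return sum(int(letter_scores.get(ch, 0)) for ch in str(w).lower())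
--
--     words5_set = set(words5)
--     items = []
--     n = 5
--
--     # Rows
--     for i, w in enumerate(rows):
--         if w in words5_set:
--             items.append({"word": w, "score": score_word(w)})
--         rev = w[::-1]
--         if rev in words5_set and rev != w:
--             items.append({"word": rev, "score": score_word(rev)})
--
--     # Columns
--     for cidx in range(n):
--         col_str = "".join(rows[r][cidx] for r in range(n))
--         if col_str in words5_set:
--             items.append({"word": col_str, "score": score_word(col_str)})
--         rev = col_str[::-1]
--         if rev in words5_set and rev != col_str:
--             items.append({"word": rev, "score": score_word(rev)})
--
--     # Diagonals
--     def diag_idx(r: int):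
--         return r if diag_dir == "main" else (n - 1 - r)
--
--     diag_str = "".join(rows[r][diag_idx(r)] for r in range(n))
--     if diag_str in words5_set:
--         items.append({"word": diag_str, "score": score_word(diag_str)})
--     rev = diag_str[::-1]
--     if rev in words5_set and rev != diag_str:
--         items.append({"word": rev, "score": score_word(rev)})
--
--     # Add other combined diag words if any (matching script logic)
--     for dw in combined_diag_words:
--         if dw in words5_set:
--             items.append({"word": dw, "score": score_word(dw)})
--
--     # FINAL SUM
--     # The Lambda version usually returns a simple sum of scores.
--     # We'll filter duplicates by word to avoid double-counting.
--     seen_words = set()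
--     total_score = 0
--     for item in items:
--         w = str(item.get("word") or "").lower()
--         if w not in seen_words:
--             total_score += score_word(w)
--             seen_words.add(w)
--
--     return total_score
-- ===== SOURCE B (Python) =====
-- from typing import List, Dict
--
--
-- def compute_lambda_style_total(
--     rows: List[str],
--     col: int,
--     target: str,
--     diag: str,
--     diag_dir: str,
--     words5: List[str],
--     combined_diag_words: List[str],
--     longest_one: str,
--     letter_scores: Dict[str, int],
-- ) -> int:
--     # Inverted algorithm: instead of generating grid candidates and testing each
--     # against the dictionary, scan the dictionary once and test each word against
--     # a set of grid lines (rows, columns, the chosen diagonal, and their reverses)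
--     # plus the combined-diagonal extras.
--     n = 5
--     cols = ["".join(rows[r][c] for r in range(n)) for c in range(n)]
--     d = "".join(rows[r][r if diag_dir == "main" else n - 1 - r] for r in range(n))
--     lines = list(rows) + cols + [d]
--     grid = {s for line in lines for s in (line, line[::-1])}
--     extras = set(combined_diag_words)
--
--     found = {w.lower() for w in words5 if w in grid or w in extras}
--     return sum(
--         sum(int(letter_scores.get(ch, 0)) for ch in str(w).lower()) for w in found
--     )
-- ===== Notes on version B (the rewrite author's own statement) =====
-- stated objective: alternative
-- what changed: Inverts the scan: instead of A's grid-driven pass (collect candidate items into a list of dicts, then a second dedup-and-resum loop), B scans the dictionary words5 once, testing each word against a precomputed set of grid lines and their reverses (plus the extras set), dedups lowercased matches in a set comprehension and sums once.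
import Mathlib
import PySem

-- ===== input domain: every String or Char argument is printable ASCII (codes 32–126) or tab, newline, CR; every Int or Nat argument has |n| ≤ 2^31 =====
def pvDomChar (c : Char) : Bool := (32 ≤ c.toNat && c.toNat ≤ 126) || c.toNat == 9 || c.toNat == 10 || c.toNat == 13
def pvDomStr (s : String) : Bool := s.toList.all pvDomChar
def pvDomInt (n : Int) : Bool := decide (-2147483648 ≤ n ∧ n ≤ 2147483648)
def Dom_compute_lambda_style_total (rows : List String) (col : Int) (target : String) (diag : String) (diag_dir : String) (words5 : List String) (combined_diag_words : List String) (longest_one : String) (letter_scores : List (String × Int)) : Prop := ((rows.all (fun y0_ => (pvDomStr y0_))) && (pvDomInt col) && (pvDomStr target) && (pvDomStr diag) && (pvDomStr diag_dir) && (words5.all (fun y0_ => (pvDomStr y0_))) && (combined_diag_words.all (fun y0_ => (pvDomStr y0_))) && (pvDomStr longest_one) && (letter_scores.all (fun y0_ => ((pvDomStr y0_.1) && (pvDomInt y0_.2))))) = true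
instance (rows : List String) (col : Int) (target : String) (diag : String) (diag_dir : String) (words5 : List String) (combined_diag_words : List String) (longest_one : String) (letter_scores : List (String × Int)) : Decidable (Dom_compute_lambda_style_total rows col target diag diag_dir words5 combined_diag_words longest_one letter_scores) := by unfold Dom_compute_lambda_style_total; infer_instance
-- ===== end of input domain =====

-- B inverts A's scan: it tests each dictionary word against a set of grid lines (and their
-- reverses) instead of testing grid candidates against the dictionary, dedups lowercased
-- matches in one set and sums once (objective: alternative, similar cost).


-- shared helpers: score_word is textually identical in both Pythons; pvRev is w[::-1]
-- (exact: reverse of the character list); pvCell is rows[r][c] — Pre_ keeps both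
-- indices in range, so the defaults are never reached on admitted inputs.
def pvScore (letter_scores : List (String × Int)) (w : String) : Int :=
  ((PySem.Str.lower w).toList.map
    (fun ch => PySem.Dict.getD (PySem.Dict.mk letter_scores) (String.mk [ch]) 0)).sum

def pvRev (w : String) : String := String.mk w.toList.reverse

def pvCell (rows : List String) (r c : Int) : Char :=
  (PySem.Str.pyGet? (PySem.List.pyGetD rows r "") c).getD ' '

-- ===== PORT A =====
def compute_lambda_style_total (rows : List String) (col : Int) (target : String) (diag : String) (diag_dir : String) (words5 : List String) (combined_diag_words : List String) (longest_one : String) (letter_scores : List (String × Int)) : Int :=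
  let words5_set : PySem.Set String := PySem.Set.ofList words5
  let items : List (String × Int) := []
  let n : Int := 5
  -- Rows
  let items := rows.foldl (fun items w =>
    let items := if words5_set.contains w then items ++ [(w, pvScore letter_scores w)] else items
    let rev := pvRev w
    if words5_set.contains rev ∧ rev ≠ w then items ++ [(rev, pvScore letter_scores rev)] else items) items
  -- Columns
  let items := (PySem.List.pyRange 0 n 1).foldl (fun items cidx =>
    let col_str := String.mk ((PySem.List.pyRange 0 n 1).map (fun r => pvCell rows r cidx))
    let items := if words5_set.contains col_str then items ++ [(col_str, pvScore letter_scores col_str)] else items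
    let rev := pvRev col_str
    if words5_set.contains rev ∧ rev ≠ col_str then items ++ [(rev, pvScore letter_scores rev)] else items) items
  -- Diagonals
  let diag_str := String.mk ((PySem.List.pyRange 0 n 1).map (fun r => pvCell rows r (if diag_dir = "main" then r else n - 1 - r)))
  let items := if words5_set.contains diag_str then items ++ [(diag_str, pvScore letter_scores diag_str)] else items
  let rev := pvRev diag_str
  let items := if words5_set.contains rev ∧ rev ≠ diag_str then items ++ [(rev, pvScore letter_scores rev)] else items
  -- combined diag words
  let items := combined_diag_words.foldl (fun items dw =>
    if words5_set.contains dw then items ++ [(dw, pvScore letter_scores dw)] else items) items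
  -- final dedup-and-sum loop
  let st := items.foldl (fun (st : PySem.Set String × Int) item =>
      let w := PySem.Str.lower item.1
      if w ∈ st.1 then st else (st.1.add w, st.2 + pvScore letter_scores w))
    (PySem.Set.empty, 0)
  st.2

-- ===== PORT B =====
def compute_lambda_style_total_alt (rows : List String) (col : Int) (target : String) (diag : String) (diag_dir : String) (words5 : List String) (combined_diag_words : List String) (longest_one : String) (letter_scores : List (String × Int)) : Int :=
  let n : Int := 5
  let cols := (PySem.List.pyRange 0 n 1).map (fun c => String.mk ((PySem.List.pyRange 0 n 1).map (fun r => pvCell rows r c)))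
  let d := String.mk ((PySem.List.pyRange 0 n 1).map (fun r => pvCell rows r (if diag_dir = "main" then r else n - 1 - r)))
  let lines := rows ++ cols ++ [d]
  let grid : PySem.Set String := PySem.Set.ofList (lines.flatMap (fun line => [line, pvRev line]))
  let extras : PySem.Set String := PySem.Set.ofList combined_diag_words
  let found : PySem.Set String := PySem.Set.ofList ((words5.filter (fun w => grid.contains w || extras.contains w)).map PySem.Str.lower)
  (found.map (pvScore letter_scores)).sum

-- ===== PRECONDITION & SPEC =====
-- A raises IndexError (rows[r][cidx] in the column/diagonal loops) exactly when rows has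
-- fewer than 5 entries or one of its first five rows has fewer than 5 characters.
def Pre_compute_lambda_style_total (rows : List String) (col : Int) (target : String) (diag : String) (diag_dir : String) (words5 : List String) (combined_diag_words : List String) (longest_one : String) (letter_scores : List (String × Int)) : Prop :=
  5 ≤ rows.length ∧ ∀ s ∈ rows.take 5, 5 ≤ s.toList.length
instance (rows : List String) (col : Int) (target : String) (diag : String) (diag_dir : String) (words5 : List String) (combined_diag_words : List String) (longest_one : String) (letter_scores : List (String × Int)) : Decidable (Pre_compute_lambda_style_total rows col target diag diag_dir words5 combined_diag_words longest_one letter_scores) := by unfold Pre_compute_lambda_style_total; infer_instance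

def pvWitness_compute_lambda_style_total : List String × Int × String × String × String × List String × List String × String × (List (String × Int)) :=
  (["abcde", "fghij", "klmno", "pqrst", "uvwxy"], 0, "", "", "main", ["abcde"], [], "", [("a", 1)])

def Spec_compute_lambda_style_total (rows : List String) (col : Int) (target : String) (diag : String) (diag_dir : String) (words5 : List String) (combined_diag_words : List String) (longest_one : String) (letter_scores : List (String × Int)) (out : Int) : Prop := out = compute_lambda_style_total_alt rows col target diag diag_dir words5 combined_diag_words longest_one letter_scores
instance (rows : List String) (col : Int) (target : String) (diag : String) (diag_dir : String) (words5 : List String) (combined_diag_words : List String) (longest_one : String) (letter_scores : List (String × Int)) (out : Int) : Decidable (Spec_compute_lambda_style_total rows col target diag diag_dir words5 combined_diag_words longest_one letter_scores out) := by unfold Spec_compute_lambda_style_total; infer_instance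

-- ===== CLAIM (what is proved, stated in full; the proofs are below) =====
def Claim_equal_compute_lambda_style_total : Prop := ∀ (rows : List String) (col : Int) (target : String) (diag : String) (diag_dir : String) (words5 : List String) (combined_diag_words : List String) (longest_one : String) (letter_scores : List (String × Int)), Dom_compute_lambda_style_total rows col target diag diag_dir words5 combined_diag_words longest_one letter_scores → Pre_compute_lambda_style_total rows col target diag diag_dir words5 combined_diag_words longest_one letter_scores → Spec_compute_lambda_style_total rows col target diag diag_dir words5 combined_diag_words longest_one letter_scores (compute_lambda_style_total rows col target diag diag_dir words5 combined_diag_words longest_one letter_scores)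

-- ===== LEMMAS AND PROOFS =====

theorem pvWitness_ok :
    Dom_compute_lambda_style_total (pvWitness_compute_lambda_style_total.1) (pvWitness_compute_lambda_style_total.2.1) (pvWitness_compute_lambda_style_total.2.2.1) (pvWitness_compute_lambda_style_total.2.2.2.1) (pvWitness_compute_lambda_style_total.2.2.2.2.1) (pvWitness_compute_lambda_style_total.2.2.2.2.2.1) (pvWitness_compute_lambda_style_total.2.2.2.2.2.2.1) (pvWitness_compute_lambda_style_total.2.2.2.2.2.2.2.1) (pvWitness_compute_lambda_style_total.2.2.2.2.2.2.2.2) ∧ Pre_compute_lambda_style_total (pvWitness_compute_lambda_style_total.1) (pvWitness_compute_lambda_style_total.2.1) (pvWitness_compute_lambda_style_total.2.2.1) (pvWitness_compute_lambda_style_total.2.2.2.1) (pvWitness_compute_lambda_style_total.2.2.2.2.1) (pvWitness_compute_lambda_style_total.2.2.2.2.2.1) (pvWitness_compute_lambda_style_total.2.2.2.2.2.2.1) (pvWitness_compute_lambda_style_total.2.2.2.2.2.2.2.1) (pvWitness_compute_lambda_style_total.2.2.2.2.2.2.2.2) := by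
  decide

-- A's pair group of items for a candidate string w (the word and its reverse).
def pvGA (S : PySem.Set String) (ls : List (String × Int)) (w : String) : List (String × Int) :=
  (if S.contains w then [(w, pvScore ls w)] else []) ++
  (if S.contains (pvRev w) ∧ pvRev w ≠ w then [(pvRev w, pvScore ls (pvRev w))] else [])

-- A's final loop: starting from a set s and its score-sum, it folds to (s.update l, its sum).
theorem pv_dedup_loop (f : String → Int) (l : List String) (s : PySem.Set String) :
    l.foldl (fun (st : PySem.Set String × Int) w =>
        if w ∈ st.1 then st else (st.1.add w, st.2 + f w)) (s, (s.map f).sum)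
      = (s.update l, ((s.update l).map f).sum) := by
  induction l generalizing s with
  | nil => simp [PySem.Set.update_nil]
  | cons x xs ih =>
    simp only [List.foldl_cons, PySem.Set.update_cons]
    by_cases hx : x ∈ s
    · rw [if_pos hx, PySem.Set.add_of_mem hx]
      exact ih s
    · rw [if_neg hx, PySem.Set.add_of_not_mem hx]
      have h := ih (s ++ [x])
      simpa [List.map_append] using h

-- per-candidate-pair membership: A's (guarded) pair items, lowercased, have the same
-- members as the filtered pair [w, rev w], lowercased.
theorem pv_pair_mem (S : PySem.Set String) (ls : List (String × Int)) (w x : String) :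
    (x ∈ (pvGA S ls w).map (fun it => PySem.Str.lower it.1)) ↔
      x ∈ ([w, pvRev w].filter (fun s => S.contains s)).map PySem.Str.lower := by
  by_cases h3 : pvRev w = w
  · rw [h3]
    by_cases h1 : w ∈ S <;> simp [pvGA, h1, h3, List.filter]
  · by_cases h1 : w ∈ S <;> by_cases h2 : pvRev w ∈ S <;>
      simp [pvGA, h1, h2, h3, List.filter]

-- proof-side names for the column / diagonal strings, A's item list and B's line list
def pvColStr (rows : List String) (cidx : Int) : String :=
  String.mk ((PySem.List.pyRange 0 5 1).map (fun r => pvCell rows r cidx))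

def pvDiagStr (rows : List String) (diag_dir : String) : String :=
  String.mk ((PySem.List.pyRange 0 5 1).map (fun r => pvCell rows r (if diag_dir = "main" then r else 5 - 1 - r)))

def pvItemsA (rows : List String) (diag_dir : String) (comb : List String) (S : PySem.Set String) (ls : List (String × Int)) : List (String × Int) :=
  rows.flatMap (pvGA S ls) ++
  (PySem.List.pyRange 0 5 1).flatMap (fun cidx => pvGA S ls (pvColStr rows cidx)) ++
  pvGA S ls (pvDiagStr rows diag_dir) ++
  (comb.filter (fun dw => S.contains dw)).map (fun dw => (dw, pvScore ls dw))

def pvCands (rows : List String) (diag_dir : String) (comb : List String) : List String :=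
  rows.flatMap (fun w => [w, pvRev w]) ++
  (PySem.List.pyRange 0 5 1).flatMap (fun c => [pvColStr rows c, pvRev (pvColStr rows c)]) ++
  [pvDiagStr rows diag_dir, pvRev (pvDiagStr rows diag_dir)] ++
  comb

def pvLines (rows : List String) (diag_dir : String) : List String :=
  rows ++ (PySem.List.pyRange 0 5 1).map (pvColStr rows) ++ [pvDiagStr rows diag_dir]

-- one guarded pair-append step of A's row/column/diagonal scans is `acc ++ pvGA S ls w`
theorem pv_pair_step (S : PySem.Set String) (ls : List (String × Int)) (acc : List (String × Int)) (w : String) :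
    (if S.contains (pvRev w) = true ∧ pvRev w ≠ w then
        (if S.contains w = true then acc ++ [(w, pvScore ls w)] else acc) ++ [(pvRev w, pvScore ls (pvRev w))]
      else (if S.contains w = true then acc ++ [(w, pvScore ls w)] else acc))
      = acc ++ pvGA S ls w := by
  simp only [pvGA]; split_ifs <;> simp

theorem pv_A_eq (rows : List String) (col : Int) (target : String) (diag : String) (diag_dir : String) (words5 : List String) (comb : List String) (longest_one : String) (ls : List (String × Int)) :
    compute_lambda_style_total rows col target diag diag_dir words5 comb longest_one ls
      = ((PySem.Set.ofList ((pvItemsA rows diag_dir comb (PySem.Set.ofList words5) ls).map (fun it => PySem.Str.lower it.1))).map (pvScore ls)).sum := by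
  unfold compute_lambda_style_total
  simp only [pv_pair_step, PySem.List.foldl_append_eq_flatMap, PySem.List.foldl_append_if]
  rw [← List.foldl_map (f := fun it : String × Int => PySem.Str.lower it.1)
        (g := fun (st : PySem.Set String × Int) w => if w ∈ st.1 then st else (st.1.add w, st.2 + pvScore ls w))]
  have hd := pv_dedup_loop (pvScore ls)
    ((pvItemsA rows diag_dir comb (PySem.Set.ofList words5) ls).map (fun it => PySem.Str.lower it.1)) []
  simp only [List.map_nil, List.sum_nil] at hd
  have harg : ((([] : List (String × Int)) ++ rows.flatMap (pvGA (PySem.Set.ofList words5) ls) ++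
        (PySem.List.pyRange 0 5 1).flatMap (fun cidx => pvGA (PySem.Set.ofList words5) ls (pvColStr rows cidx)) ++
        pvGA (PySem.Set.ofList words5) ls (pvDiagStr rows diag_dir)) ++
        (comb.filter (fun dw => (PySem.Set.ofList words5).contains dw)).map (fun dw => (dw, pvScore ls dw)))
      = pvItemsA rows diag_dir comb (PySem.Set.ofList words5) ls := by
    simp [pvItemsA, pvColStr, pvDiagStr]
  rw [show (PySem.Set.empty : PySem.Set String) = ([] : List String) from rfl]
  simp only [pvColStr, pvDiagStr] at harg
  rw [harg, hd]
  simp only [PySem.Set.update_nil_left]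

theorem pv_B_eq (rows : List String) (col : Int) (target : String) (diag : String) (diag_dir : String) (words5 : List String) (comb : List String) (longest_one : String) (ls : List (String × Int)) :
    compute_lambda_style_total_alt rows col target diag diag_dir words5 comb longest_one ls
      = ((PySem.Set.ofList ((words5.filter (fun w =>
            (PySem.Set.ofList ((pvLines rows diag_dir).flatMap (fun l => [l, pvRev l]))).contains w ||
            (PySem.Set.ofList comb).contains w)).map PySem.Str.lower)).map (pvScore ls)).sum := by
  unfold compute_lambda_style_total_alt
  simp only [pvLines, pvDiagStr]
  rfl

theorem pv_mem_iff (rows : List String) (diag_dir : String) (comb : List String) (S : PySem.Set String) (ls : List (String × Int)) (x : String) :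
    x ∈ (pvItemsA rows diag_dir comb S ls).map (fun it => PySem.Str.lower it.1) ↔
      x ∈ ((pvCands rows diag_dir comb).filter (fun s => S.contains s)).map PySem.Str.lower := by
  simp only [pvItemsA, pvCands, List.map_append, List.filter_append, List.mem_append,
    List.filter_flatMap, List.map_flatMap, List.mem_flatMap, List.map_map]
  refine or_congr (or_congr (or_congr ?_ ?_) ?_) ?_
  · exact exists_congr fun w => and_congr_right fun _ => pv_pair_mem S ls w x
  · exact exists_congr fun c => and_congr_right fun _ => pv_pair_mem S ls (pvColStr rows c) x
  · exact pv_pair_mem S ls (pvDiagStr rows diag_dir) x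
  · simp [Function.comp]

-- the candidate multiset of A and the line-pair multiset of B have the same MEMBERS
theorem pv_cands_mem (rows : List String) (diag_dir : String) (comb : List String) (s : String) :
    s ∈ pvCands rows diag_dir comb ↔
      s ∈ (pvLines rows diag_dir).flatMap (fun l => [l, pvRev l]) ∨ s ∈ comb := by
  simp only [pvCands, pvLines, List.mem_append, List.mem_flatMap, List.mem_map,
    List.mem_cons, List.not_mem_nil, or_false]
  constructor
  · rintro (((⟨w, hw, h⟩ | ⟨c, hc, h⟩) | h) | h)
    · exact Or.inl ⟨w, Or.inl (Or.inl hw), h⟩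
    · exact Or.inl ⟨pvColStr rows c, Or.inl (Or.inr ⟨c, hc, rfl⟩), h⟩
    · exact Or.inl ⟨pvDiagStr rows diag_dir, Or.inr rfl, by tauto⟩
    · exact Or.inr h
  · rintro (⟨l, ((hl | ⟨c, hc, rfl⟩) | rfl), h⟩ | h)
    · exact Or.inl (Or.inl (Or.inl ⟨l, hl, h⟩))
    · exact Or.inl (Or.inl (Or.inr ⟨c, hc, h⟩))
    · exact Or.inl (Or.inr (by tauto))
    · exact Or.inr h

-- flipping the scan: filtering A's candidates by the dictionary has the same lowered
-- members as filtering the dictionary by B's grid/extras sets.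
theorem pv_flip (rows : List String) (diag_dir : String) (comb : List String) (words5 : List String) (x : String) :
    x ∈ ((pvCands rows diag_dir comb).filter (fun s => (PySem.Set.ofList words5).contains s)).map PySem.Str.lower ↔
      x ∈ (words5.filter (fun w =>
            (PySem.Set.ofList ((pvLines rows diag_dir).flatMap (fun l => [l, pvRev l]))).contains w ||
            (PySem.Set.ofList comb).contains w)).map PySem.Str.lower := by
  simp only [List.mem_map, List.mem_filter, PySem.Set.contains_iff, PySem.Set.mem_ofList,
    Bool.or_eq_true, pv_cands_mem]
  constructor <;> rintro ⟨a, ⟨h1, h2⟩, h3⟩ <;> exact ⟨a, ⟨h2, h1⟩, h3⟩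

-- ===== VERDICT =====
theorem compute_lambda_style_total_spec : Claim_equal_compute_lambda_style_total := by
  intro rows col target diag diag_dir words5 combined_diag_words longest_one letter_scores _ _
  unfold Spec_compute_lambda_style_total
  rw [pv_A_eq, pv_B_eq]
  refine List.Perm.sum_eq (List.Perm.map _ ?_)
  rw [List.perm_ext_iff_of_nodup (PySem.Set.nodup_ofList _) (PySem.Set.nodup_ofList _)]
  intro a
  rw [PySem.Set.mem_ofList, PySem.Set.mem_ofList]
  exact (pv_mem_iff rows diag_dir combined_diag_words (PySem.Set.ofList words5) letter_scores a).trans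
    (pv_flip rows diag_dir combined_diag_words words5 a)
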